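-- pv_equiv track=rewrite | github.com/leejin21/algProbSolve-PY | programmars/stack_que/stq_4.py | solution
-- ===== SOURCE A (Python) =====
-- from collections import deque
--
-- def solution(priorities, location):
--     cnt = 0
--     pr_cur = True
--     que = deque(priorities)
--     while(pr_cur == False or location != -1):
--         cur = que.popleft()
--         location -= 1
--         pr_cur = True
--         for val in que:
--             if cur < val:
--                 que.append(cur)
--                 pr_cur = False
--                 break
--         if pr_cur == True:
--             cnt += 1
--         elif location == -1:
--             location = len(que) - 1
--
--     return cnt
-- ===== SOURCE B (Python) =====
-- def solution(priorities, location):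
--     que = list(priorities)
--     loc = location
--     cnt = 0
--     while True:
--         j = que.index(max(que))
--         cnt += 1
--         if loc == j:
--             return cnt
--         que = que[j+1:] + que[:j]
--         loc = loc - j - 1 if loc > j else loc + len(que) - j
-- ===== Notes on version B (the rewrite author's own statement) =====
-- stated objective: faster
-- what changed: A simulates the printer queue one element at a time (popleft, inner comparison scan with a flag, append-to-back) while B jumps per printed document: find the maximum, locate its first index, slice-rotate the queue past it and update the target index arithmetically, removing the element-by-element rotation entirely.
-- outside the precondition, e.g. on solution([5], -1): A returns 0, B raises ValueError; on solution([1, 2], 2): A returns 2, B returns 2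
import Mathlib
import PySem

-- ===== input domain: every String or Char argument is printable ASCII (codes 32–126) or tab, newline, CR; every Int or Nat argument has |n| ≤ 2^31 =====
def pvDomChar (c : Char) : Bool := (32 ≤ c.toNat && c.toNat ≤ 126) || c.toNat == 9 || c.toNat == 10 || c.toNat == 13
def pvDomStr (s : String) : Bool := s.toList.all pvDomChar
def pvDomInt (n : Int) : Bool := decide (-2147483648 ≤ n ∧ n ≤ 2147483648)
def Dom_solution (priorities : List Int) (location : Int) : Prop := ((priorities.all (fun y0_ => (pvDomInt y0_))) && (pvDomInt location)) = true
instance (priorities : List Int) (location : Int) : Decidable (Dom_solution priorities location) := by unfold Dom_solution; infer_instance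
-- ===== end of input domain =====

-- B replaces A's one-element-at-a-time rotation (each with an inner comparison scan and a flag)
-- by one find-max/index/slice jump per printed document; equivalence proved on in-range locations.

-- ===== PORT A =====
-- index of the first maximal element of a queue; used only as the termination measure of A's while loop
def pvFMI (que : List Int) : Nat := que.findIdx (fun x => que.all (fun y => decide (y ≤ x)))

theorem pvFMI_rotate (c : Int) (rest : List Int)
    (h : rest.any (fun v => decide (c < v)) = true) :
    pvFMI (rest ++ [c]) < pvFMI (c :: rest) := by
  obtain ⟨v, hv, hcv⟩ := List.any_eq_true.mp h
  have hcv : c < v := of_decide_eq_true hcv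
  have hPQ : (fun x => (rest ++ [c]).all (fun y => decide (y ≤ x)))
      = (fun x => (c :: rest).all (fun y => decide (y ≤ x))) := by
    funext x
    simp only [List.all_append, List.all_cons, List.all_nil, Bool.and_true]
    exact Bool.and_comm _ _
  unfold pvFMI
  rw [hPQ, List.findIdx_cons]
  have hcfalse : (c :: rest).all (fun y => decide (y ≤ c)) = false := by
    rw [List.all_eq_false]
    exact ⟨v, List.mem_cons_of_mem _ hv, by simpa using not_le.mpr hcv⟩
  rw [hcfalse]
  simp only [cond_false]
  -- the maximum of c :: rest lies in rest, so findIdx hits inside rest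
  have hmax : ∃ m ∈ rest, (c :: rest).all (fun y => decide (y ≤ m)) = true := by
    have hfold := PySem.List.le_foldl_max rest c
    rcases PySem.List.foldl_max_mem rest c with hm | hm
    · exfalso; have := hfold.2 v hv; omega
    · exact ⟨rest.foldl max c, hm, by
        simp only [List.all_cons, List.all_eq_true, Bool.and_eq_true, decide_eq_true_eq]
        exact ⟨by simpa using hfold.1, fun y hy => hfold.2 y hy⟩⟩
  have hlt : rest.findIdx (fun x => (c :: rest).all (fun y => decide (y ≤ x))) < rest.length := by
    rw [List.findIdx_lt_length]
    obtain ⟨m, hm, hall⟩ := hmax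
    exact ⟨m, hm, hall⟩
  rw [List.findIdx_append, if_pos hlt]
  omega

-- A's while loop, transliterated: state (que, location, cnt, pr_cur)
def aLoop (que : List Int) (location : Int) (cnt : Int) (pr_cur : Bool) : Int :=
  if pr_cur = false ∨ location ≠ -1 then
    match que with
    | [] => cnt        -- Python: que.popleft() raises IndexError here; excluded by Pre_
    | cur :: rest =>
      -- location -= 1; for val in que: if cur < val: que.append(cur); pr_cur = False; break
      if h : rest.any (fun val => decide (cur < val)) = true then
        -- pr_cur == False; elif (location - 1) == -1: location = len(que) - 1
        if location - 1 = -1 then aLoop (rest ++ [cur]) (rest.length : Int) cnt false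
        else aLoop (rest ++ [cur]) (location - 1) cnt false
      else
        -- pr_cur == True: cnt += 1
        aLoop rest (location - 1) (cnt + 1) true
  else cnt
termination_by (que.length, pvFMI que)
decreasing_by
  · apply Prod.Lex.right'
    · simp
    · simpa using pvFMI_rotate cur rest h
  · apply Prod.Lex.right'
    · simp
    · simpa using pvFMI_rotate cur rest h
  · apply Prod.Lex.left; simp

def solution (priorities : List Int) (location : Int) : Int :=
  aLoop priorities location 0 true

-- ===== PORT B =====
-- B's while loop: find the first maximum, count one print, jump-rotate the queue past it
def bLoop (que : List Int) (loc : Int) (cnt : Int) : Int :=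
  match que with
  | [] => cnt        -- Python: max(que) raises ValueError on the emptied queue; excluded by Pre_
  | c :: rest =>
    match PySem.List.max? (c :: rest) (fun x => x) with
    | none => cnt    -- unreachable: the queue is nonempty
    | some m =>
      match hj : PySem.List.index? (c :: rest) m with
      | none => cnt  -- unreachable: m is an element of the queue
      | some j =>
        if loc = (j : Int) then cnt + 1
        else
          let que' := PySem.List.slice (c :: rest) (some ((j : Int) + 1)) none
                      ++ PySem.List.slice (c :: rest) none (some (j : Int))
          let loc' := if loc > (j : Int) then loc - (j : Int) - 1
                      else loc + (que'.length : Int) - (j : Int)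
          bLoop que' loc' (cnt + 1)
termination_by que.length
decreasing_by
  obtain ⟨hk, -, -⟩ := PySem.List.getElem_of_index?_eq_some hj
  have h1 : ((j : Int) + 1) = ((j + 1 : Nat) : Int) := by push_cast; ring
  simp only [h1, PySem.List.slice_from_natCast, PySem.List.slice_to_natCast,
    List.length_append, List.length_drop, List.length_take, List.length_cons] at *
  omega

def solution_alt (priorities : List Int) (location : Int) : Int :=
  bLoop priorities location 0

-- ===== PRECONDITION & SPEC =====
-- Pre_ restricts to in-range locations, the problem's domain: outside it A usually raises
-- IndexError (popleft on an emptied deque), except on accidental corners of its loop flag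
-- (e.g. location = -1 returns 0 before printing anything) which B has no reason to reproduce.
def Pre_solution (priorities : List Int) (location : Int) : Prop :=
  0 ≤ location ∧ location < (priorities.length : Int)
instance (priorities : List Int) (location : Int) : Decidable (Pre_solution priorities location) := by
  unfold Pre_solution; infer_instance

def pvWitness_solution : List Int × Int := ([2, 1, 3, 2], 2)

def Spec_solution (priorities : List Int) (location : Int) (out : Int) : Prop := out = solution_alt priorities location
instance (priorities : List Int) (location : Int) (out : Int) : Decidable (Spec_solution priorities location out) := by unfold Spec_solution; infer_instance

-- ===== CLAIM (what is proved, stated in full; the proofs are below) =====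
def Claim_equal_solution : Prop := ∀ (priorities : List Int) (location : Int), Dom_solution priorities location → Pre_solution priorities location → Spec_solution priorities location (solution priorities location)

-- ===== LEMMAS AND PROOFS =====

theorem pvFMI_le (q : List Int) : pvFMI q ≤ q.length :=
  List.findIdx_le_length

-- once A's loop has rotated, pr_cur is only a flag: the body never reads it
theorem aLoop_false_eq_true (q : List Int) (l cnt : Int) (hl : l ≠ -1) :
    aLoop q l cnt false = aLoop q l cnt true := by
  rw [aLoop.eq_def, aLoop.eq_def]
  rw [if_pos (Or.inl rfl), if_pos (Or.inr hl)]

-- one unfolding of A's loop in the print case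
theorem aLoop_print (c : Int) (rest : List Int) (loc cnt : Int) (h0 : 0 ≤ loc)
    (hrot : ¬ rest.any (fun val => decide (c < val)) = true) :
    aLoop (c :: rest) loc cnt true = aLoop rest (loc - 1) (cnt + 1) true := by
  rw [aLoop, if_pos (Or.inr (by omega))]
  simp only [dif_neg hrot]

-- one unfolding of A's loop in the rotate case
theorem aLoop_rotate (c : Int) (rest : List Int) (loc cnt : Int) (h0 : 0 ≤ loc)
    (hrot : rest.any (fun val => decide (c < val)) = true) :
    aLoop (c :: rest) loc cnt true
      = aLoop (rest ++ [c]) (if loc - 1 = -1 then (rest.length : Int) else loc - 1) cnt false := by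
  rw [aLoop, if_pos (Or.inr (by omega))]
  simp only [dif_pos hrot]
  split <;> rfl

-- the maximum of a nonempty queue whose head dominates is the head
theorem max?_head (c : Int) (rest : List Int) (hub : ∀ y ∈ rest, y ≤ c) :
    PySem.List.max? (c :: rest) (fun x => x) = some c := by
  cases hmx : PySem.List.max? (c :: rest) (fun x => x) with
  | none => exact absurd ((PySem.List.max?_eq_none_iff _ _).mp hmx) (by simp)
  | some m =>
    have hmem := PySem.List.max?_mem hmx
    have hmax := PySem.List.max?_isMax hmx c (by simp)
    have : m ≤ c := by
      rcases List.mem_cons.mp hmem with h | h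
      · omega
      · exact hub m h
    have : m = c := le_antisymm this hmax
    rw [this]

-- rotating the head to the back does not change the maximum (same elements)
theorem max?_rotate (c : Int) (r : Int) (rtl : List Int) (M : Int)
    (hm : PySem.List.max? (c :: r :: rtl) (fun x => x) = some M) :
    PySem.List.max? (r :: (rtl ++ [c])) (fun x => x) = some M := by
  cases hmx : PySem.List.max? (r :: (rtl ++ [c])) (fun x => x) with
  | none => exact absurd ((PySem.List.max?_eq_none_iff _ _).mp hmx) (by simp)
  | some m' =>
    have hmem' := PySem.List.max?_mem hmx
    have hmem := PySem.List.max?_mem hm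
    have h1 : m' ≤ M := by
      apply PySem.List.max?_isMax hm
      simp only [List.mem_cons, List.mem_append] at hmem' ⊢
      tauto
    have h2 : M ≤ m' := by
      apply PySem.List.max?_isMax hmx
      simp only [List.mem_cons, List.mem_append] at hmem ⊢
      tauto
    rw [show m' = M by omega]

-- one unfolding of B's loop when the head is the (first) maximum
theorem bLoop_print (c : Int) (rest : List Int) (loc cnt : Int) (h0 : 0 ≤ loc)
    (hub : ∀ y ∈ rest, y ≤ c) :
    bLoop (c :: rest) loc cnt = if loc = 0 then cnt + 1 else bLoop rest (loc - 1) (cnt + 1) := by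
  rw [bLoop.eq_def]
  simp only [max?_head c rest hub]
  split
  · rename_i hnone
    rw [PySem.List.index?_cons_self] at hnone
    exact absurd hnone (by simp)
  · rename_i j hj
    rw [PySem.List.index?_cons_self] at hj
    injection hj with hj0
    subst hj0
    simp only [Nat.cast_zero, zero_add, sub_zero, gt_iff_lt]
    have h1 : ((1 : Int)) = ((1 : Nat) : Int) := by norm_num
    rw [h1, PySem.List.slice_from_natCast, PySem.List.slice_to (c :: rest) (b := 0) (by norm_num)]
    simp only [Int.toNat_zero, List.take_zero, List.append_nil, List.drop_succ_cons,
      List.drop_zero, Nat.cast_one]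
    by_cases hz : loc = 0
    · rw [if_pos hz, if_pos hz]
    · rw [if_neg hz, if_neg hz, if_pos (show (0 : Int) < loc by omega)]

-- one unfolding of B's loop, in terms of the maximum and its first index
theorem bLoop_step (c : Int) (rest : List Int) (loc cnt : Int) (M : Int) (j : Nat)
    (hm : PySem.List.max? (c :: rest) (fun x => x) = some M)
    (hj : PySem.List.index? (c :: rest) M = some j) :
    bLoop (c :: rest) loc cnt
      = if loc = (j : Int) then cnt + 1
        else bLoop ((c :: rest).drop (j + 1) ++ (c :: rest).take j)
          (if loc > (j : Int) then loc - j - 1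
           else loc + (((c :: rest).length : Int) - 1) - j) (cnt + 1) := by
  obtain ⟨hk, -, -⟩ := PySem.List.getElem_of_index?_eq_some hj
  rw [bLoop.eq_def]
  simp only [hm]
  split
  · rename_i hnone
    rw [hj] at hnone
    exact absurd hnone (by simp)
  · rename_i j' hj'
    rw [hj] at hj'
    injection hj' with hj0
    subst hj0
    have h1 : ((j : Int) + 1) = ((j + 1 : Nat) : Int) := by push_cast; ring
    rw [h1, PySem.List.slice_from_natCast, PySem.List.slice_to_natCast]
    have hlen : ((((c :: rest).drop (j + 1) ++ (c :: rest).take j)).length : Int)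
        = (((c :: rest).length : Int)) - 1 := by
      simp only [List.length_append, List.length_drop, List.length_take, List.length_cons] at *
      push_cast [Nat.min_def]
      split <;> omega
    rw [hlen]

-- B's loop is invariant under A's single rotation step
theorem bLoop_rotate (c : Int) (rest : List Int) (loc cnt : Int)
    (hany : rest.any (fun val => decide (c < val)) = true)
    (hl : loc < ((c :: rest).length : Int)) :
    bLoop (rest ++ [c]) (if loc - 1 = -1 then (rest.length : Int) else loc - 1) cnt
      = bLoop (c :: rest) loc cnt := by
  obtain ⟨v, hv, hcv⟩ := List.any_eq_true.mp hany
  have hcv : c < v := of_decide_eq_true hcv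
  cases hm : PySem.List.max? (c :: rest) (fun x => x) with
  | none => exact absurd ((PySem.List.max?_eq_none_iff _ _).mp hm) (by simp)
  | some M =>
  have hub := PySem.List.max?_isMax hm
  have hcM : c < M := lt_of_lt_of_le hcv (hub v (List.mem_cons_of_mem _ hv))
  have hMrest : M ∈ rest := by
    rcases List.mem_cons.mp (PySem.List.max?_mem hm) with h | h
    · omega
    · exact h
  obtain ⟨j₀, hj0⟩ := Option.isSome_iff_exists.mp
    ((PySem.List.index?_isSome_iff rest M).mpr hMrest)
  obtain ⟨hk, -, -⟩ := PySem.List.getElem_of_index?_eq_some hj0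
  have hjc : PySem.List.index? (c :: rest) M = some (j₀ + 1) := by
    rw [PySem.List.index?_cons_of_ne rest (by omega), hj0]; rfl
  have hjrot : PySem.List.index? (rest ++ [c]) M = some j₀ := by
    rw [PySem.List.index?_append_of_mem _ hMrest, hj0]
  cases rest with
  | nil => simp at hv
  | cons r rtl =>
  have hmrot := max?_rotate c r rtl M hm
  rw [List.cons_append] at hjrot
  rw [List.cons_append]
  rw [bLoop_step r (rtl ++ [c]) _ cnt M j₀ hmrot hjrot]
  rw [bLoop_step c (r :: rtl) loc cnt M (j₀ + 1) hm hjc]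
  simp only [List.length_cons] at hk
  have hA : (r :: (rtl ++ [c])).drop (j₀ + 1) ++ (r :: (rtl ++ [c])).take j₀
      = (c :: r :: rtl).drop (j₀ + 1 + 1) ++ (c :: r :: rtl).take (j₀ + 1) := by
    rw [List.drop_succ_cons, List.drop_succ_cons, List.drop_succ_cons,
        List.take_succ_cons,
        List.drop_append_of_le_length (by omega),
        show (r :: (rtl ++ [c])) = (r :: rtl) ++ [c] from rfl,
        List.take_append_of_le_length (by simp; omega)]
    simp
  rw [hA]
  have hlen1 : (((r :: (rtl ++ [c])).length : Int)) = (rtl.length : Int) + 2 := by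
    simp only [List.length_cons, List.length_append, List.length_nil]; push_cast; omega
  have hlen2 : (((c :: r :: rtl).length : Int)) = (rtl.length : Int) + 2 := by
    push_cast [List.length_cons]; omega
  rw [hlen1, hlen2]
  simp only [List.length_cons] at hl
  by_cases hz : loc = 0
  · rw [if_pos (by omega : loc - 1 = -1)]
    rw [if_neg (by push_cast [List.length_cons]; omega :
          ¬(((r :: rtl).length : Int)) = (j₀ : Int))]
    rw [if_neg (by push_cast; omega : ¬loc = ((j₀ + 1 : Nat) : Int))]
    rw [if_pos (by push_cast [List.length_cons]; omega :
          (((r :: rtl).length : Int)) > (j₀ : Int))]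
    rw [if_neg (by push_cast; omega : ¬loc > ((j₀ + 1 : Nat) : Int))]
    congr 1
    push_cast [List.length_cons]
    omega
  · rw [if_neg (by omega : ¬loc - 1 = -1)]
    by_cases he : loc = (j₀ : Int) + 1
    · rw [if_pos (by omega : loc - 1 = (j₀ : Int)),
          if_pos (by push_cast; omega : loc = ((j₀ + 1 : Nat) : Int))]
    · rw [if_neg (by omega : ¬loc - 1 = (j₀ : Int)),
          if_neg (by push_cast; omega : ¬loc = ((j₀ + 1 : Nat) : Int))]
      by_cases hgt : (j₀ : Int) + 1 < loc
      · rw [if_pos (by omega : loc - 1 > (j₀ : Int)),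
            if_pos (by push_cast; omega : loc > ((j₀ + 1 : Nat) : Int))]
        congr 1
        push_cast
        omega
      · rw [if_neg (by omega : ¬loc - 1 > (j₀ : Int)),
            if_neg (by push_cast; omega : ¬loc > ((j₀ + 1 : Nat) : Int))]
        congr 1
        push_cast
        omega

-- main invariant: A's loop and B's loop agree from any in-range state
theorem aLoop_eq_bLoop (N : Nat) : ∀ (que : List Int) (loc cnt : Int),
    que.length * que.length + pvFMI que ≤ N →
    0 ≤ loc → loc < (que.length : Int) →
    aLoop que loc cnt true = bLoop que loc cnt := by
  induction N with
  | zero =>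
    intro que loc cnt hN h0 hl
    cases que with
    | nil => simp at hl; omega
    | cons c rest =>
      exfalso
      have hlen : 0 < (c :: rest).length := by simp
      have := Nat.mul_pos hlen hlen
      omega
  | succ N ih =>
    intro que loc cnt hN h0 hl
    cases que with
    | nil => simp at hl; omega
    | cons c rest =>
    simp only [List.length_cons] at hl
    by_cases hrot : rest.any (fun val => decide (c < val)) = true
    · -- rotate case: one A-step, B invariant
      obtain ⟨v, hv, -⟩ := List.any_eq_true.mp hrot
      have hrne : 0 < rest.length := List.length_pos_of_mem hv
      rw [aLoop_rotate c rest loc cnt h0 hrot]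
      set loc₂ := if loc - 1 = -1 then ((rest.length : Int)) else loc - 1 with hloc₂
      have hb0 : 0 ≤ loc₂ := by rw [hloc₂]; split_ifs <;> omega
      have hb1 : loc₂ < ((rest ++ [c]).length : Int) := by
        have : ((rest ++ [c]).length : Int) = (rest.length : Int) + 1 := by
          simp only [List.length_append, List.length_cons, List.length_nil]; push_cast; omega
        rw [this, hloc₂]; split_ifs <;> omega
      rw [aLoop_false_eq_true _ _ _ (by omega : loc₂ ≠ -1)]
      rw [ih (rest ++ [c]) loc₂ cnt ?_ hb0 hb1]
      · exact bLoop_rotate c rest loc cnt hrot (by simp only [List.length_cons]; omega)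
      · have hL : (rest ++ [c]).length = (c :: rest).length := by simp
        rw [hL]
        have := pvFMI_rotate c rest hrot
        omega
    · -- print case: both pop the head
      have hub : ∀ y ∈ rest, y ≤ c := by
        intro y hy
        by_contra hcon
        exact hrot (List.any_eq_true.mpr ⟨y, hy, decide_eq_true (by omega)⟩)
      rw [aLoop_print c rest loc cnt h0 hrot, bLoop_print c rest loc cnt h0 hub]
      by_cases hz : loc = 0
      · subst hz
        rw [if_pos rfl, aLoop.eq_def, if_neg (by norm_num)]
      · rw [if_neg hz]
        refine ih rest (loc - 1) (cnt + 1) ?_ (by omega) (by omega)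
        have h1 := pvFMI_le rest
        have h2 : (c :: rest).length * (c :: rest).length
            = rest.length * rest.length + 2 * rest.length + 1 := by
          simp only [List.length_cons]; ring
        omega

-- ===== VERDICT (by name: the statement is the Claim_ definition above) =====
theorem solution_spec : Claim_equal_solution := by
  unfold Claim_equal_solution
  intro priorities location hdom hpre
  unfold Spec_solution solution solution_alt
  exact aLoop_eq_bLoop
    (priorities.length * priorities.length + pvFMI priorities)
    priorities location 0 le_rfl hpre.1 hpre.2
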